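-- pv_equiv track=rewrite | github.com/lucaspagnuolo/deprovisioning_azure | deprovisiong_azure.py | genera_template_deprovisioning
-- ===== SOURCE A (Python) =====
-- def genera_template_deprovisioning(
--     upn: str,
--     ticket: str | None,
--     display_name: str | None,
--     manager_display_name: str | None,
--     shared_mailboxes: list[str],
--     group_names: list[str],
--     has_user_mailbox: bool,
-- ) -> list[str]:
--     # Soggetto
--     if ticket and ticket.strip():
--         title = f"[Consip – SR][{ticket.strip()}] Deprovisioning - {display_name or upn}"
--     else:
--         title = f"Consip – SR Deprovisioning - {display_name or upn}"
--
--     lines = []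
--     lines.append("Ciao,")
--     lines.append(f"per {upn}")
--
--     # Costruiamo dinamicamente gli step numerati
--     step_items: list[str] = []
--     step_items.append("Disabilitare l’account di Azure")
--     step_items.append(f"Impostazione Manager con: {manager_display_name or '—'}")
--     step_items.append("Impostare Hide dalla Rubrica")
--
--     # Punto PST se l'utente ha mailbox
--     if has_user_mailbox:
--         step_items.append(
--             f"Estrarre il PST (O365 eDiscovery) da archiviare in "
--             r"\nasconsip2....\backuppst\03 - backup email cancellate"
--             f"\{upn} (in z7 con psw condivisa)"
--         )
--
--     step_items.append("Rimuovere le appartenenze dall’utenza Azure")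
--     step_items.append("Rimuovere le applicazioni dall’utenza Azure")
--     step_items.append("Rimozione ruoli")
--
--     # Aggiungi gli step numerati
--     for idx, item in enumerate(step_items, start=1):
--         lines.append(f"{idx}. {item}")
--
--     step = len(step_items) + 1
--
--     # Sezioni dinamiche successive
--     if shared_mailboxes:
--         lines.append(f"{step}. Rimozione abilitazione da SM:")
--         for sm in shared_mailboxes:
--             lines.append(f"   - {sm}")
--         step += 1
--
--     if group_names:
--         lines.append(f"{step}. Rimozione gruppi Azure:")
--         for g in group_names:
--             lines.append(f"   - {g}")
--         step += 1
--
--     # Finali (aggiornati: rimosse foto Azure e Wi-Fi)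
--     lines.append(f"{step}. Rimozione licenze"); step += 1
--
--     return [title] + lines
-- ===== SOURCE B (Python) =====
-- def genera_template_deprovisioning(
--     upn,
--     ticket,
--     display_name,
--     manager_display_name,
--     shared_mailboxes,
--     group_names,
--     has_user_mailbox,
-- ):
--     if ticket and ticket.strip():
--         title = f"[Consip – SR][{ticket.strip()}] Deprovisioning - {display_name or upn}"
--     else:
--         title = f"Consip – SR Deprovisioning - {display_name or upn}"
--
--     blocks = [
--         ("Disabilitare l’account di Azure", []),
--         (f"Impostazione Manager con: {manager_display_name or '—'}", []),
--         ("Impostare Hide dalla Rubrica", []),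
--     ]
--     if has_user_mailbox:
--         blocks.append((
--             f"Estrarre il PST (O365 eDiscovery) da archiviare in "
--             r"\nasconsip2....\backuppst\03 - backup email cancellate"
--             f"\{upn} (in z7 con psw condivisa)", []))
--     blocks += [
--         ("Rimuovere le appartenenze dall’utenza Azure", []),
--         ("Rimuovere le applicazioni dall’utenza Azure", []),
--         ("Rimozione ruoli", []),
--     ]
--     if shared_mailboxes:
--         blocks.append(("Rimozione abilitazione da SM:", shared_mailboxes))
--     if group_names:
--         blocks.append(("Rimozione gruppi Azure:", group_names))
--     blocks.append(("Rimozione licenze", []))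
--
--     lines = [title, "Ciao,", f"per {upn}"]
--     for i, (header, subs) in enumerate(blocks, start=1):
--         lines.append(f"{i}. {header}")
--         lines.extend(f"   - {x}" for x in subs)
--     return lines
-- ===== Notes on version B (the rewrite author's own statement) =====
-- stated objective: idiomatic
-- what changed: B builds a list of (header, sub_items) blocks and numbers them in one enumerate pass, replacing A's manual running step counter and scattered conditional append sections.
import Mathlib
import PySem

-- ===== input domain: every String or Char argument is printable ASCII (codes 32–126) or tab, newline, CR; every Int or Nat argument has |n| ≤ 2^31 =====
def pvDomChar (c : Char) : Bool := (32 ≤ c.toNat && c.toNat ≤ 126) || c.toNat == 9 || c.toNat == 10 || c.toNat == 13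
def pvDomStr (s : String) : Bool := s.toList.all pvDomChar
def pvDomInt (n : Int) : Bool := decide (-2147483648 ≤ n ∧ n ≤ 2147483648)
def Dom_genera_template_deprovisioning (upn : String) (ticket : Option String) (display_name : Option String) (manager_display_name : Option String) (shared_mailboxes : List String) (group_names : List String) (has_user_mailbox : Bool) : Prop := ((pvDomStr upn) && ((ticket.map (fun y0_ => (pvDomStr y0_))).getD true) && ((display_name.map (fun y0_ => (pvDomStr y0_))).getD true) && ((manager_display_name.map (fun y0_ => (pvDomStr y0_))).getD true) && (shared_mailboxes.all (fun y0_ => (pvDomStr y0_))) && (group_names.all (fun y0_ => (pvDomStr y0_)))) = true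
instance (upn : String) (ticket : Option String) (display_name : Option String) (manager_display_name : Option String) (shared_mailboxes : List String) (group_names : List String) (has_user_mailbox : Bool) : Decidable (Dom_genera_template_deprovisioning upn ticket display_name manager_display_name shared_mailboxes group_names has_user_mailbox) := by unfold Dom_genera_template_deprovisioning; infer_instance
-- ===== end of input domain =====

-- B replaces A's running step counter and scattered conditional sections by a single
-- (header, sub_items) block list numbered in one enumerate pass; objective: idiomatic.

-- `o or d` for Python strings (None / "" fall through to the default); used by both sources
def pyOrStr (o : Option String) (d : String) : String :=
  match o with
  | some s => if s = "" then d else s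
  | none => d

-- the title computation, identical in Source A and Source B
def pvTitle (upn : String) (ticket : Option String) (display_name : Option String) : String :=
  match ticket with
  | some t =>
      if t ≠ "" ∧ PySem.Str.strip t ≠ "" then
        "[Consip – SR][" ++ PySem.Str.strip t ++ "] Deprovisioning - " ++ pyOrStr display_name upn
      else
        "Consip – SR Deprovisioning - " ++ pyOrStr display_name upn
  | none => "Consip – SR Deprovisioning - " ++ pyOrStr display_name upn

-- the PST step text (same literal in both sources)
def pvPst (upn : String) : String :=
  "Estrarre il PST (O365 eDiscovery) da archiviare in \\nasconsip2....\\backuppst\\03 - backup email cancellate\\" ++ upn ++ " (in z7 con psw condivisa)"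

-- ===== PORT A =====
def genera_template_deprovisioning (upn : String) (ticket : Option String) (display_name : Option String) (manager_display_name : Option String) (shared_mailboxes : List String) (group_names : List String) (has_user_mailbox : Bool) : List String :=
  let title := pvTitle upn ticket display_name
  let lines : List String := ["Ciao,", "per " ++ upn]
  let step_items : List String :=
    ["Disabilitare l’account di Azure",
     "Impostazione Manager con: " ++ pyOrStr manager_display_name "—",
     "Impostare Hide dalla Rubrica"]
    ++ (if has_user_mailbox then [pvPst upn] else [])
    ++ ["Rimuovere le appartenenze dall’utenza Azure",
        "Rimuovere le applicazioni dall’utenza Azure",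
        "Rimozione ruoli"]
  -- for idx, item in enumerate(step_items, start=1): lines.append(f"{idx}. {item}")
  let lines := lines ++ (PySem.List.enumerate step_items 1).map
      (fun p => PySem.Int.toStr p.1 ++ ". " ++ p.2)
  let step : Int := (step_items.length : Int) + 1
  let st := if shared_mailboxes ≠ [] then
      (lines ++ [PySem.Int.toStr step ++ ". Rimozione abilitazione da SM:"]
             ++ shared_mailboxes.map (fun sm => "   - " ++ sm), step + 1)
    else (lines, step)
  let lines := st.1
  let step := st.2
  let st := if group_names ≠ [] then
      (lines ++ [PySem.Int.toStr step ++ ". Rimozione gruppi Azure:"]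
             ++ group_names.map (fun g => "   - " ++ g), step + 1)
    else (lines, step)
  let lines := st.1
  let step := st.2
  let lines := lines ++ [PySem.Int.toStr step ++ ". Rimozione licenze"]
  title :: lines

-- ===== PORT B =====
def genera_template_deprovisioning_alt (upn : String) (ticket : Option String) (display_name : Option String) (manager_display_name : Option String) (shared_mailboxes : List String) (group_names : List String) (has_user_mailbox : Bool) : List String :=
  let title := pvTitle upn ticket display_name
  let blocks : List (String × List String) :=
    [("Disabilitare l’account di Azure", []),
     ("Impostazione Manager con: " ++ pyOrStr manager_display_name "—", []),
     ("Impostare Hide dalla Rubrica", [])]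
    ++ (if has_user_mailbox then [(pvPst upn, ([] : List String))] else [])
    ++ [("Rimuovere le appartenenze dall’utenza Azure", []),
        ("Rimuovere le applicazioni dall’utenza Azure", []),
        ("Rimozione ruoli", [])]
    ++ (if shared_mailboxes ≠ [] then [("Rimozione abilitazione da SM:", shared_mailboxes)] else [])
    ++ (if group_names ≠ [] then [("Rimozione gruppi Azure:", group_names)] else [])
    ++ [("Rimozione licenze", [])]
  [title, "Ciao,", "per " ++ upn]
  ++ (PySem.List.enumerate blocks 1).flatMap
       (fun p => (PySem.Int.toStr p.1 ++ ". " ++ p.2.1) :: p.2.2.map (fun x => "   - " ++ x))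

-- ===== PRECONDITION & SPEC =====
def Spec_genera_template_deprovisioning (upn : String) (ticket : Option String) (display_name : Option String) (manager_display_name : Option String) (shared_mailboxes : List String) (group_names : List String) (has_user_mailbox : Bool) (out : List String) : Prop := out = genera_template_deprovisioning_alt upn ticket display_name manager_display_name shared_mailboxes group_names has_user_mailbox
instance (upn : String) (ticket : Option String) (display_name : Option String) (manager_display_name : Option String) (shared_mailboxes : List String) (group_names : List String) (has_user_mailbox : Bool) (out : List String) : Decidable (Spec_genera_template_deprovisioning upn ticket display_name manager_display_name shared_mailboxes group_names has_user_mailbox out) := by unfold Spec_genera_template_deprovisioning; infer_instance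

-- ===== CLAIM (what is proved, stated in full; the proofs are below) =====
def Claim_equal_genera_template_deprovisioning : Prop := ∀ (upn : String) (ticket : Option String) (display_name : Option String) (manager_display_name : Option String) (shared_mailboxes : List String) (group_names : List String) (has_user_mailbox : Bool), Dom_genera_template_deprovisioning upn ticket display_name manager_display_name shared_mailboxes group_names has_user_mailbox → Spec_genera_template_deprovisioning upn ticket display_name manager_display_name shared_mailboxes group_names has_user_mailbox (genera_template_deprovisioning upn ticket display_name manager_display_name shared_mailboxes group_names has_user_mailbox)

-- ===== LEMMAS AND PROOFS =====

-- ===== VERDICT (by name: the statement is the Claim_ definition above) =====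
theorem genera_template_deprovisioning_spec : Claim_equal_genera_template_deprovisioning := by
  intro upn ticket display_name manager_display_name shared_mailboxes group_names has_user_mailbox _
  unfold Spec_genera_template_deprovisioning
  unfold genera_template_deprovisioning genera_template_deprovisioning_alt
  rcases has_user_mailbox <;>
    rcases shared_mailboxes with _ | ⟨s, ss⟩ <;>
    rcases group_names with _ | ⟨g, gs⟩ <;>
    simp [PySem.List.enumerate_cons, PySem.List.enumerate_nil,
          List.flatMap, List.map_cons, List.map_nil] <;>
    decide
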